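-- pv_equiv track=rewrite | github.com/GSI-Fing-Udelar/tectonic | tectonic/cli.py | range_to_str
-- ===== SOURCE A (Python) =====
-- def range_to_str(r):
--     """Returns an appropriate text describing the range."""
--     if not r:
--         return ""
--
--     s = []
--     it = iter(r)
--     prev = next(it)
--     accum = [str(prev)]
--     for n in it:
--         if n == prev + 1:
--             accum.append(str(n))
--         else:
--             if len(accum) > 2:
--                 s.append(f"from {accum[0]} to {accum[-1]}")
--             else:
--                 s += accum
--             accum = [str(n)]
--         prev = n
--     if len(accum) > 2:
--         s.append(f"from {accum[0]} to {accum[-1]}")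
--     else:
--         s += accum
--
--     if len(s) > 1:
--         return ", ".join(s[:-1]) + ", and " + s[-1]
--
--     return s[0]
-- ===== SOURCE B (Python) =====
-- def range_to_str(r):
--     """Returns an appropriate text describing the range."""
--     if not r:
--         return ""
--     # Pass 1: compress the sequence into maximal consecutive runs, kept only as (lo, hi) bounds.
--     bounds = []
--     for v in list(r):
--         if bounds and bounds[-1][1] + 1 == v:
--             bounds[-1] = (bounds[-1][0], v)
--         else:
--             bounds.append((v, v))
--     # Pass 2: format each run from its bounds.
--     s = []
--     for lo, hi in bounds:
--         if hi - lo > 1: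
--             s.append(f"from {lo} to {hi}")
--         elif hi == lo:
--             s.append(str(lo))
--         else:
--             s += [str(lo), str(hi)]
--     if len(s) > 1:
--         return ", ".join(s[:-1]) + ", and " + s[-1]
--     return s[0]
-- ===== Notes on version B (the rewrite author's own statement) =====
-- stated objective: alternative
-- what changed: A streams once over the list with a prev/string-accumulator state, flushing each run as it ends; B first compresses the list into (lo, hi) bounds of maximal consecutive runs and then formats those bounds in a second pass, avoiding the per-element string accumulation.
import Mathlib
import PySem

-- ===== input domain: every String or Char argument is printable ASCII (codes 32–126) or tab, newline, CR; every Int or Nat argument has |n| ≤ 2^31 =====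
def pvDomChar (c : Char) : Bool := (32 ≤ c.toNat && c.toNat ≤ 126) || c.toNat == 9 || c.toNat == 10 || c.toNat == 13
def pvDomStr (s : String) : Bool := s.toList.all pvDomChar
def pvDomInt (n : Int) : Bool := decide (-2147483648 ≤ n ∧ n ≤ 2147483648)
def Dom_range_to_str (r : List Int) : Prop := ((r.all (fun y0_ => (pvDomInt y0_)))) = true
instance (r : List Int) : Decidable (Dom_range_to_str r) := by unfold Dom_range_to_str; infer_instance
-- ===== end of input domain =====

-- B replaces A's streaming string accumulator by a two-pass scheme over (lo, hi) run bounds; return values proved equal on all inputs.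

-- ===== PORT A =====
-- one iteration of A's `for n in it` loop over the state (prev, accum, s)
def stepA (st : Int × List String × List String) (n : Int) : Int × List String × List String :=
  let (prev, accum, s) := st
  if n = prev + 1 then
    (n, accum ++ [PySem.Int.toStr n], s)
  else
    let s' := if accum.length > 2 then
        s ++ ["from " ++ accum.head! ++ " to " ++ accum.getLast!]
      else s ++ accum
    (n, [PySem.Int.toStr n], s')

def range_to_str (r : List Int) : String :=
  match r with
  | [] => ""
  | prev0 :: rest =>
    let st := rest.foldl stepA (prev0, [PySem.Int.toStr prev0], [])
    let accum := st.2.1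
    let s0 := st.2.2
    let s := if accum.length > 2 then
        s0 ++ ["from " ++ accum.head! ++ " to " ++ accum.getLast!]
      else s0 ++ accum
    if s.length > 1 then
      String.intercalate ", " s.dropLast ++ ", and " ++ s.getLast!
    else s.head!

-- ===== PORT B =====
-- one iteration of B's first loop: extend the last (lo, hi) run bound or start a new one
def stepB (bounds : List (Int × Int)) (v : Int) : List (Int × Int) :=
  if bounds ≠ [] ∧ bounds.getLast!.2 + 1 = v then
    bounds.dropLast ++ [(bounds.getLast!.1, v)]
  else
    bounds ++ [(v, v)]

-- one iteration of B's second loop: format one (lo, hi) run bound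
def fmtB (s : List String) (b : Int × Int) : List String :=
  if b.2 - b.1 > 1 then s ++ ["from " ++ PySem.Int.toStr b.1 ++ " to " ++ PySem.Int.toStr b.2]
  else if b.2 = b.1 then s ++ [PySem.Int.toStr b.1]
  else s ++ [PySem.Int.toStr b.1, PySem.Int.toStr b.2]

def range_to_str_alt (r : List Int) : String :=
  if r = [] then ""
  else
    let bounds := r.foldl stepB []
    let s := bounds.foldl fmtB []
    if s.length > 1 then
      String.intercalate ", " s.dropLast ++ ", and " ++ s.getLast!
    else s.head!

-- ===== PRECONDITION & SPEC =====
def Spec_range_to_str (r : List Int) (out : String) : Prop := out = range_to_str_alt r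
instance (r : List Int) (out : String) : Decidable (Spec_range_to_str r out) := by unfold Spec_range_to_str; infer_instance

-- ===== CLAIM (what is proved, stated in full; the proofs are below) =====
def Claim_equal_range_to_str : Prop := ∀ (r : List Int), Dom_range_to_str r → Spec_range_to_str r (range_to_str r)

-- ===== LEMMAS AND PROOFS =====

lemma gl_eq {α} [Inhabited α] (l : List α) (h : l ≠ []) : l.getLast! = l.getLast h := by
  cases l with
  | nil => exact absurd rfl h
  | cons a t => rfl

lemma dl_gl {α} [Inhabited α] (l : List α) (h : l ≠ []) : l.dropLast ++ [l.getLast!] = l := by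
  rw [gl_eq l h]; exact List.dropLast_concat_getLast h

lemma gl_concat {α} [Inhabited α] (a : α) (l : List α) : (l ++ [a]).getLast! = a := by
  rw [gl_eq _ (by simp)]; exact List.getLast_concat

lemma head_bang_map (f : Int → String) (l : List Int) (h : l ≠ []) :
    (l.map f).head! = f l.head! := by
  cases l with
  | nil => exact absurd rfl h
  | cons a t => simp [List.head!]

lemma getLast_bang_map (f : Int → String) (l : List Int) (h : l ≠ []) :
    (l.map f).getLast! = f l.getLast! := by
  have h2 : l.dropLast ++ [l.getLast!] = l := dl_gl l h
  calc (l.map f).getLast! = ((l.dropLast ++ [l.getLast!]).map f).getLast! := by rw [h2]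
    _ = f l.getLast! := by rw [List.map_append, List.map_singleton]; exact gl_concat _ _

-- the run of consecutive integers from lo to hi (lo ≤ hi)
def intRun (lo hi : Int) : List Int :=
  (List.range ((hi - lo).toNat + 1)).map (fun i => lo + Int.ofNat i)

-- the output pieces a run with bounds (lo, hi) contributes
def pieces (lo hi : Int) : List String :=
  if hi - lo > 1 then ["from " ++ PySem.Int.toStr lo ++ " to " ++ PySem.Int.toStr hi]
  else if hi = lo then [PySem.Int.toStr lo]
  else [PySem.Int.toStr lo, PySem.Int.toStr hi]

lemma fmtB_eq (s : List String) (lo hi : Int) : fmtB s (lo, hi) = s ++ pieces lo hi := by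
  simp only [fmtB, pieces]; split_ifs <;> rfl

lemma intRun_ne (lo hi : Int) : intRun lo hi ≠ [] := by
  apply List.ne_nil_of_length_pos; simp [intRun]

lemma intRun_single (lo : Int) : intRun lo lo = [lo] := by
  simp [intRun, List.range_succ]

lemma intRun_succ (lo hi : Int) (h : lo ≤ hi) : intRun lo (hi + 1) = intRun lo hi ++ [hi + 1] := by
  have hk : (hi + 1 - lo).toNat = (hi - lo).toNat + 1 := by omega
  rw [intRun, hk, List.range_succ, List.map_append, intRun]
  simp only [List.map_cons, List.map_nil]
  congr 2
  simp only [Int.ofNat_eq_natCast]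
  omega

lemma intRun_head (lo hi : Int) : (intRun lo hi).head! = lo := by
  simp [intRun, List.range_succ_eq_map, List.head!]

lemma intRun_last (lo hi : Int) (h : lo ≤ hi) : (intRun lo hi).getLast! = hi := by
  rw [intRun, List.range_succ, List.map_append, List.map_cons, List.map_nil, gl_concat]
  simp only [Int.ofNat_eq_natCast]
  omega

-- A's flush of accum = (intRun lo hi).map toStr appends exactly pieces lo hi
lemma flush_pieces (lo hi : Int) (h : lo ≤ hi) (s0 : List String) :
    (if ((intRun lo hi).map PySem.Int.toStr).length > 2 then
        s0 ++ ["from " ++ ((intRun lo hi).map PySem.Int.toStr).head! ++ " to " ++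
          ((intRun lo hi).map PySem.Int.toStr).getLast!]
      else s0 ++ (intRun lo hi).map PySem.Int.toStr) = s0 ++ pieces lo hi := by
  rw [head_bang_map _ _ (intRun_ne lo hi), getLast_bang_map _ _ (intRun_ne lo hi),
    intRun_head, intRun_last lo hi h]
  have hlen : ((intRun lo hi).map PySem.Int.toStr).length = (hi - lo).toNat + 1 := by
    simp [intRun]
  rw [hlen]
  simp only [pieces]
  by_cases h2 : hi - lo > 1
  · rw [if_pos (by omega), if_pos h2]
  · rw [if_neg (by omega), if_neg h2]
    by_cases h3 : hi = lo
    · subst h3; rw [intRun_single, if_pos rfl]; rfl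
    · have h4 : hi = lo + 1 := by omega
      subst h4
      rw [intRun_succ lo lo le_rfl, intRun_single, if_neg h3]
      rfl

lemma foldB_append (front : List (Int × Int)) (lo hi : Int) :
    (front ++ [(lo, hi)]).foldl fmtB [] = front.foldl fmtB [] ++ pieces lo hi := by
  rw [List.foldl_append]
  simp only [List.foldl_cons, List.foldl_nil]
  rw [fmtB_eq]

-- main invariant: A's loop over xs, currently inside the run (lo, hi) with the runs in
-- `front` already flushed, agrees with B's bounds-building loop followed by formatting
lemma foldAB (xs : List Int) : ∀ (lo hi : Int) (front : List (Int × Int)), lo ≤ hi →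
    (if (xs.foldl stepA (hi, (intRun lo hi).map PySem.Int.toStr, front.foldl fmtB [])).2.1.length > 2 then
        (xs.foldl stepA (hi, (intRun lo hi).map PySem.Int.toStr, front.foldl fmtB [])).2.2 ++
          ["from " ++ (xs.foldl stepA (hi, (intRun lo hi).map PySem.Int.toStr, front.foldl fmtB [])).2.1.head! ++
            " to " ++ (xs.foldl stepA (hi, (intRun lo hi).map PySem.Int.toStr, front.foldl fmtB [])).2.1.getLast!]
      else (xs.foldl stepA (hi, (intRun lo hi).map PySem.Int.toStr, front.foldl fmtB [])).2.2 ++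
        (xs.foldl stepA (hi, (intRun lo hi).map PySem.Int.toStr, front.foldl fmtB [])).2.1)
    = (xs.foldl stepB (front ++ [(lo, hi)])).foldl fmtB [] := by
  induction xs with
  | nil =>
    intro lo hi front h
    simp only [List.foldl_nil]
    rw [flush_pieces lo hi h, foldB_append]
  | cons n ns ih =>
    intro lo hi front h
    simp only [List.foldl_cons, stepA]
    by_cases hc : n = hi + 1
    · subst hc
      rw [if_pos rfl]
      have e : (intRun lo hi).map PySem.Int.toStr ++ [PySem.Int.toStr (hi + 1)] =
          (intRun lo (hi + 1)).map PySem.Int.toStr := by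
        rw [intRun_succ lo hi h]; simp
      rw [e]
      have eb : stepB (front ++ [(lo, hi)]) (hi + 1) = front ++ [(lo, hi + 1)] := by
        have hl : (front ++ [(lo, hi)]).getLast! = (lo, hi) := gl_concat _ _
        rw [stepB, if_pos ⟨by simp, by rw [hl]⟩, hl]
        simp
      rw [eb]
      exact ih lo (hi + 1) front (by omega)
    · rw [if_neg hc]
      rw [flush_pieces lo hi h]
      have e2 : front.foldl fmtB [] ++ pieces lo hi = (front ++ [(lo, hi)]).foldl fmtB [] :=
        (foldB_append front lo hi).symm
      rw [e2]
      have eb : stepB (front ++ [(lo, hi)]) n = (front ++ [(lo, hi)]) ++ [(n, n)] := by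
        have hl : (front ++ [(lo, hi)]).getLast! = (lo, hi) := gl_concat _ _
        rw [stepB, if_neg]
        rintro ⟨-, hcc⟩
        rw [hl] at hcc
        exact hc (by omega)
      rw [eb]
      have hih := ih n n (front ++ [(lo, hi)]) le_rfl
      rw [intRun_single] at hih
      simp only [List.map_cons, List.map_nil] at hih
      exact hih

-- ===== VERDICT (by name: the statement is the Claim_ definition above) =====
theorem range_to_str_spec : Claim_equal_range_to_str := by
  intro r _
  unfold Spec_range_to_str
  cases r with
  | nil => rfl
  | cons x xs =>
    simp only [range_to_str, range_to_str_alt, reduceCtorEq, if_neg, not_false_iff]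
    rw [List.foldl_cons]
    have eb : stepB [] x = [] ++ [(x, x)] := by
      rw [stepB, if_neg (by simp)]
    rw [eb]
    have hAB := foldAB xs x x [] le_rfl
    rw [intRun_single] at hAB
    simp only [List.foldl_nil, List.map_cons, List.map_nil] at hAB
    rw [hAB]
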